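-- pv_equiv track=rewrite | github.com/vakabus/gcopdd | tools/viewers/common.py | matrix_apply_mapping_to_columns
-- ===== SOURCE A (Python) =====
-- def make_matrix(height, width, value):
-- 	return [[value for _x in range(width)] for _y in range(height)]
--
-- def matrix_dimensions(matrix):
-- 	height = len(matrix)
-- 	row_widths = map(len, matrix)
-- 	width = next(row_widths, 0)
-- 	assert all(row_width == width for row_width in row_widths)
-- 	return height, width
--
-- def matrix_apply_mapping_to_columns(old_indices, matrix, newsize, mapping, start):
-- 	height, width = matrix_dimensions(matrix)
-- 	assert len(old_indices) == width
-- 	result = make_matrix(height, newsize, start)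
-- 	for y, row in enumerate(matrix):
-- 		for x, value in zip(old_indices, row):
-- 			result[y][mapping[x]] += value
-- 	return result
-- ===== SOURCE B (Python) =====
-- def matrix_apply_mapping_to_columns(old_indices, matrix, newsize, mapping, start):
-- 	assert all(len(row) == len(old_indices) for row in matrix)
-- 	# invert the mapping once: for each target column, the source positions feeding it
-- 	cols = [mapping[x] for x in old_indices]
-- 	targets = [[] for _j in range(newsize)]
-- 	for p, m in enumerate(cols):
-- 		targets[m].append(p)
-- 	# column-oriented: each output cell is start plus the sum of its contributors
-- 	return [[start + sum(row[p] for p in targets[j]) for j in range(newsize)]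
-- 	        for row in matrix]
-- ===== Notes on version B (the rewrite author's own statement) =====
-- stated objective: alternative
-- what changed: B inverts the column mapping once into a target->source-positions table and builds each output cell directly as start plus the sum of its contributors, instead of A's in-place accumulation into a preallocated result matrix driven by per-entry mapping lookups.
import Mathlib
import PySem

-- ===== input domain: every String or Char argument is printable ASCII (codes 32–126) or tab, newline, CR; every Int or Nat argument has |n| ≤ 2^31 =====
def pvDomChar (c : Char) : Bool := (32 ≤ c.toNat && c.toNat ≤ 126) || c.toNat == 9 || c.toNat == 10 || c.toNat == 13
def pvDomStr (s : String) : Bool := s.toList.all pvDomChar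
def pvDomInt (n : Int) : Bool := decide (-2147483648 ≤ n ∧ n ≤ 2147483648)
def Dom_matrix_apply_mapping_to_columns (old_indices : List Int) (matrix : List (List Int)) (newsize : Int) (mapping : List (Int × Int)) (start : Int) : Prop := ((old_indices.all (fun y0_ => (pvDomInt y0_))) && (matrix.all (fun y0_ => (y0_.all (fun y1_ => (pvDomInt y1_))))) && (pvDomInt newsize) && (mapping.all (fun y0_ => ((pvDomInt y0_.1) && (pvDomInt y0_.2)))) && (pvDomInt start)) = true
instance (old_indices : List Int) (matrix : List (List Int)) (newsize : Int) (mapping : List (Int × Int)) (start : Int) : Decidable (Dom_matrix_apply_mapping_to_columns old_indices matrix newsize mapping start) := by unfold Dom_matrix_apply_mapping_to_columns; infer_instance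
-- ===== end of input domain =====

-- B replaces A's in-place accumulation into a preallocated result by an inverted
-- target-column -> source-positions table and per-cell sums (objective: alternative).

-- ===== PORT A =====
-- make_matrix(height, width, value)
def pvMakeMatrix (height width value : Int) : List (List Int) :=
  (PySem.List.pyRange 0 height 1).map (fun _ => (PySem.List.pyRange 0 width 1).map (fun _ => value))

def matrix_apply_mapping_to_columns (old_indices : List Int) (matrix : List (List Int)) (newsize : Int) (mapping : List (Int × Int)) (start : Int) : List (List Int) :=
  -- height, width = matrix_dimensions(matrix); asserts raise outside Pre_
  let height : Int := matrix.length
  let result := pvMakeMatrix height newsize start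
  (PySem.List.enumerate matrix).foldl (fun result yrow =>
    (old_indices.zip yrow.2).foldl (fun result xv =>
      -- result[y][mapping[x]] += value   (KeyError/IndexError excluded by Pre_)
      let m := PySem.Dict.getD (PySem.Dict.mk mapping) xv.1 0
      let row := PySem.List.pyGetD result yrow.1 []
      PySem.List.pySetD result yrow.1
        (PySem.List.pySetD row m (PySem.List.pyGetD row m 0 + xv.2))) result) result

-- ===== PORT B =====
def matrix_apply_mapping_to_columns_alt (old_indices : List Int) (matrix : List (List Int)) (newsize : Int) (mapping : List (Int × Int)) (start : Int) : List (List Int) :=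
  -- cols = [mapping[x] for x in old_indices]
  let cols := old_indices.map (fun x => PySem.Dict.getD (PySem.Dict.mk mapping) x 0)
  -- targets = [[] for _j in range(newsize)]; for p, m in enumerate(cols): targets[m].append(p)
  let targets := (PySem.List.enumerate cols).foldl
    (fun t pm => PySem.List.pySetD t pm.2 (PySem.List.pyGetD t pm.2 [] ++ [pm.1]))
    ((PySem.List.pyRange 0 newsize 1).map (fun _ => ([] : List Int)))
  -- [[start + sum(row[p] for p in targets[j]) for j in range(newsize)] for row in matrix]
  matrix.map (fun row =>
    (PySem.List.pyRange 0 newsize 1).map (fun j =>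
      start + ((PySem.List.pyGetD targets j []).map (fun p => PySem.List.pyGetD row p 0)).sum))

-- ===== PRECONDITION & SPEC =====
-- Pre_ = exactly the inputs where A returns: rectangular matrix whose width is
-- len(old_indices) (also when matrix is empty, where the width is 0), and every
-- old index has a mapping entry whose value is a valid (possibly negative) Python
-- index into a row of length newsize; otherwise A raises Assertion/Key/IndexError.
def Pre_matrix_apply_mapping_to_columns (old_indices : List Int) (matrix : List (List Int)) (newsize : Int) (mapping : List (Int × Int)) (start : Int) : Prop :=
  (∀ row ∈ matrix, row.length = old_indices.length) ∧
  (matrix = [] → old_indices = []) ∧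
  (∀ x ∈ old_indices, PySem.Dict.contains (PySem.Dict.mk mapping) x = true ∧
     -newsize ≤ PySem.Dict.getD (PySem.Dict.mk mapping) x 0 ∧
     PySem.Dict.getD (PySem.Dict.mk mapping) x 0 < newsize)
instance (old_indices : List Int) (matrix : List (List Int)) (newsize : Int) (mapping : List (Int × Int)) (start : Int) : Decidable (Pre_matrix_apply_mapping_to_columns old_indices matrix newsize mapping start) := by unfold Pre_matrix_apply_mapping_to_columns; infer_instance

def pvWitness_matrix_apply_mapping_to_columns : List Int × List (List Int) × Int × (List (Int × Int)) × Int :=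
  ([0, 2], [[1, 2], [3, 4]], 2, [(0, 1), (2, 0)], 5)

def Spec_matrix_apply_mapping_to_columns (old_indices : List Int) (matrix : List (List Int)) (newsize : Int) (mapping : List (Int × Int)) (start : Int) (out : List (List Int)) : Prop := out = matrix_apply_mapping_to_columns_alt old_indices matrix newsize mapping start
instance (old_indices : List Int) (matrix : List (List Int)) (newsize : Int) (mapping : List (Int × Int)) (start : Int) (out : List (List Int)) : Decidable (Spec_matrix_apply_mapping_to_columns old_indices matrix newsize mapping start out) := by unfold Spec_matrix_apply_mapping_to_columns; infer_instance

-- ===== CLAIM (what is proved, stated in full; the proofs are below) =====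
def Claim_equal_matrix_apply_mapping_to_columns : Prop := ∀ (old_indices : List Int) (matrix : List (List Int)) (newsize : Int) (mapping : List (Int × Int)) (start : Int), Dom_matrix_apply_mapping_to_columns old_indices matrix newsize mapping start → Pre_matrix_apply_mapping_to_columns old_indices matrix newsize mapping start → Spec_matrix_apply_mapping_to_columns old_indices matrix newsize mapping start (matrix_apply_mapping_to_columns old_indices matrix newsize mapping start)

-- ===== LEMMAS AND PROOFS =====

theorem pv_witness_ok :
    Pre_matrix_apply_mapping_to_columns (pvWitness_matrix_apply_mapping_to_columns.1) (pvWitness_matrix_apply_mapping_to_columns.2.1) (pvWitness_matrix_apply_mapping_to_columns.2.2.1) (pvWitness_matrix_apply_mapping_to_columns.2.2.2.1) (pvWitness_matrix_apply_mapping_to_columns.2.2.2.2) := by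
  unfold Pre_matrix_apply_mapping_to_columns pvWitness_matrix_apply_mapping_to_columns; decide

-- generic "update cell at python index m with op" fold, covering both A's inner
-- accumulation (op = +) and B's targets construction (op = append)
def pvFoldU {α γ : Type} (op : α → γ → α) (d : α) (ps : List (Int × γ)) (r : List α) : List α :=
  ps.foldl (fun r mv => PySem.List.pySetD r mv.1 (op (PySem.List.pyGetD r mv.1 d) mv.2)) r

theorem pvFoldU_length {α γ : Type} (op : α → γ → α) (d : α) (ps : List (Int × γ)) (r : List α) :
    (pvFoldU op d ps r).length = r.length := by
  induction ps generalizing r with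
  | nil => rfl
  | cons p ps ih => simp [pvFoldU, List.foldl_cons] at ih ⊢; rw [ih]; simp [PySem.List.pySetD, PySem.List.pySet?]; cases PySem.List.pyIdx? r.length p.1 <;> simp

theorem pvIdx_lt (n : Nat) (i : Int) (k : Nat) (h : PySem.List.pyIdx? n i = some k) : k < n := by
  unfold PySem.List.pyIdx? at h
  split_ifs at h <;> simp_all <;> omega

theorem pvFoldU_getD {α γ : Type} (op : α → γ → α) (d : α) : ∀ (ps : List (Int × γ)) (r : List α) (j : Nat),
    (pvFoldU op d ps r).getD j d =
      (ps.filter (fun mv => PySem.List.pyIdx? r.length mv.1 == some j)).foldl (fun a mv => op a mv.2) (r.getD j d) := by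
  intro ps
  induction ps with
  | nil => intro r j; rfl
  | cons p ps ih =>
    intro r j
    have hstep : pvFoldU op d (p :: ps) r
        = pvFoldU op d ps (PySem.List.pySetD r p.1 (op (PySem.List.pyGetD r p.1 d) p.2)) := rfl
    have hlen : (PySem.List.pySetD r p.1 (op (PySem.List.pyGetD r p.1 d) p.2)).length = r.length := by
      simp [PySem.List.pySetD, PySem.List.pySet?]
      cases PySem.List.pyIdx? r.length p.1 <;> simp
    rw [hstep, ih, hlen]
    rcases h : PySem.List.pyIdx? r.length p.1 with _ | k
    · simp [PySem.List.pySetD, PySem.List.pySet?, h]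
    · have hk : k < r.length := pvIdx_lt _ _ _ h
      have hset : PySem.List.pySetD r p.1 (op (PySem.List.pyGetD r p.1 d) p.2)
          = r.set k (op (PySem.List.pyGetD r p.1 d) p.2) := by
        simp [PySem.List.pySetD, PySem.List.pySet?, h]
      have hval : PySem.List.pyGetD r p.1 d = r.getD k d := by
        simp [PySem.List.pyGetD, PySem.List.pyGet?, h, List.getD_eq_getElem?_getD]
      by_cases hkj : k = j
      · subst hkj
        rw [hset]
        have h1 : (r.set k (op (PySem.List.pyGetD r p.1 d) p.2)).getD k d
            = op (r.getD k d) p.2 := by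
          rw [List.getD_eq_getElem?_getD, List.getElem?_set_self hk, Option.getD_some, hval,
            List.getD_eq_getElem?_getD]
        rw [h1, List.filter_cons]
        simp [h]
      · rw [hset]
        have h1 : (r.set k (op (PySem.List.pyGetD r p.1 d) p.2)).getD j d = r.getD j d := by
          rw [List.getD_eq_getElem?_getD, List.getElem?_set_ne hkj, ← List.getD_eq_getElem?_getD]
        rw [h1, List.filter_cons]
        simp [h, hkj]

-- A's inner loop over one row, rewritten as a row-local fold
theorem pvA_inner (g : Int → Int) (ps : List (Int × Int)) :
    ∀ (res : List (List Int)) (y : Nat), y < res.length →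
    ps.foldl (fun res xv =>
      PySem.List.pySetD res (y : Int)
        (PySem.List.pySetD (PySem.List.pyGetD res (y : Int) []) (g xv.1)
          (PySem.List.pyGetD (PySem.List.pyGetD res (y : Int) []) (g xv.1) 0 + xv.2))) res
    = res.set y (pvFoldU (· + ·) 0 (ps.map (fun xv => (g xv.1, xv.2))) (res.getD y [])) := by
  induction ps with
  | nil =>
    intro res y hy
    have h1 : res.getD y [] = res[y] := by
      rw [List.getD_eq_getElem?_getD, List.getElem?_eq_getElem hy, Option.getD_some]
    simp only [List.foldl_nil, pvFoldU, List.map_nil, h1, List.set_getElem_self hy]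
  | cons p ps ih =>
    intro res y hy
    simp only [List.foldl_cons]
    rw [PySem.List.pyGetD_natCast, PySem.List.pySetD_natCast]
    rw [ih (res.set y (PySem.List.pySetD (res.getD y []) (g p.1)
          (PySem.List.pyGetD (res.getD y []) (g p.1) 0 + p.2))) y (by simpa using hy)]
    rw [List.set_set]
    have h2 : (res.set y (PySem.List.pySetD (res.getD y []) (g p.1)
          (PySem.List.pyGetD (res.getD y []) (g p.1) 0 + p.2))).getD y []
        = PySem.List.pySetD (res.getD y []) (g p.1)
            (PySem.List.pyGetD (res.getD y []) (g p.1) 0 + p.2) := by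
      rw [List.getD_eq_getElem?_getD, List.getElem?_set_self hy, Option.getD_some]
    rw [h2]
    rfl

-- A's outer loop, with the already-processed prefix split off
theorem pvA_outer (g : Int → Int) (old_indices : List Int) :
    ∀ (mat done pending : List (List Int)), pending.length = mat.length →
    (PySem.List.enumerate mat (done.length : Int)).foldl (fun res yrow =>
      (old_indices.zip yrow.2).foldl (fun res xv =>
        PySem.List.pySetD res yrow.1
          (PySem.List.pySetD (PySem.List.pyGetD res yrow.1 []) (g xv.1)
            (PySem.List.pyGetD (PySem.List.pyGetD res yrow.1 []) (g xv.1) 0 + xv.2))) res)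
      (done ++ pending)
    = done ++ (mat.zip pending).map (fun pr =>
        pvFoldU (· + ·) 0 ((old_indices.zip pr.1).map (fun xv => (g xv.1, xv.2))) pr.2) := by
  intro mat
  induction mat with
  | nil =>
    intro done pending h
    have : pending = [] := List.eq_nil_of_length_eq_zero h
    subst this
    simp [PySem.List.enumerate_nil]
  | cons row mat ih =>
    intro done pending h
    cases pending with
    | nil => simp at h
    | cons r0 pending =>
      rw [PySem.List.enumerate_cons]
      simp only [List.foldl_cons]
      have hy : done.length < (done ++ r0 :: pending).length := by simp
      rw [pvA_inner g (old_indices.zip row) (done ++ r0 :: pending) done.length hy]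
      have hget : (done ++ r0 :: pending).getD done.length [] = r0 := by
        rw [List.getD_eq_getElem?_getD, List.getElem?_append_right (le_refl _)]
        simp
      rw [hget]
      have hset : (done ++ r0 :: pending).set done.length
            (pvFoldU (· + ·) 0 ((old_indices.zip row).map (fun xv => (g xv.1, xv.2))) r0)
          = (done ++ [pvFoldU (· + ·) 0 ((old_indices.zip row).map (fun xv => (g xv.1, xv.2))) r0])
              ++ pending := by
        rw [List.set_append]
        simp
      rw [hset]
      have hlen : ((done ++ [pvFoldU (· + ·) 0 ((old_indices.zip row).map (fun xv => (g xv.1, xv.2))) r0]).length : Int)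
          = (done.length : Int) + 1 := by simp
      rw [← hlen, ih _ pending (by simpa using h)]
      simp

theorem pv_const_map_replicate {α : Type} (n : Int) (c : α) :
    (PySem.List.pyRange 0 n 1).map (fun _ => c) = List.replicate n.toNat c := by
  rw [PySem.List.pyRange_one]
  simp [List.map_map, List.eq_replicate_iff]

theorem pv_zip_replicate {α β γ : Type} (F : α × β → γ) :
    ∀ (xs : List α) (n : Nat) (c : β), n = xs.length →
    ((xs.zip (List.replicate n c)).map F) = xs.map (fun x => F (x, c)) := by
  intro xs
  induction xs with
  | nil => intro n c _; simp
  | cons x xs ih =>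
    intro n c hn
    cases n with
    | zero => simp at hn
    | succ m =>
      simp only [List.replicate_succ, List.zip_cons_cons, List.map_cons]
      rw [ih m c (by simpa using hn)]

-- the per-column contributions of A's row pass and of B's targets table agree
theorem pv_final (g : Int → Int) (C : Int → Bool) :
    ∀ (xs ys : List Int) (k : Nat) (full : List Int), xs.length = ys.length → full.drop k = ys →
    (((xs.zip ys).map (fun xv => (g xv.1, xv.2))).filter (fun mv => C mv.1)).map (·.2)
    = ((PySem.List.enumerate (xs.map g) (k : Int)).filter (fun pm => C pm.2)).map
        (fun pm => PySem.List.pyGetD full pm.1 0) := by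
  intro xs
  induction xs with
  | nil =>
    intro ys k full h hd
    cases ys with
    | nil => simp [PySem.List.enumerate_nil]
    | cons y ys => simp at h
  | cons x xs ih =>
    intro ys k full h hd
    cases ys with
    | nil => simp at h
    | cons y ys =>
      have hk : k < full.length := by
        have h2 := congrArg List.length hd
        simp at h2
        omega
      have hd2 : full.drop k = full[k] :: full.drop (k + 1) := List.drop_eq_getElem_cons hk
      rw [hd2] at hd
      have hfy : full[k] = y := (List.cons.injEq _ _ _ _ ▸ hd).1
      have hdrop : full.drop (k + 1) = ys := (List.cons.injEq _ _ _ _ ▸ hd).2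
      have hgetk : PySem.List.pyGetD full (k : Int) 0 = y := by
        rw [PySem.List.pyGetD_natCast, List.getD_eq_getElem?_getD, List.getElem?_eq_getElem hk,
          Option.getD_some, hfy]
      have hcast : (k : Int) + 1 = ((k + 1 : Nat) : Int) := by push_cast; ring
      have IH := ih ys (k + 1) full (by simpa using h) hdrop
      simp only [List.map_cons, List.zip_cons_cons, PySem.List.enumerate_cons, List.filter_cons,
        hcast]
      by_cases hC : C (g x) = true
      · rw [if_pos (by simpa using hC), if_pos (by simpa using hC), List.map_cons, List.map_cons,
          IH, hgetk]
      · rw [if_neg (by simpa using hC), if_neg (by simpa using hC), IH]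

def pvG (mapping : List (Int × Int)) (x : Int) : Int :=
  PySem.Dict.getD (PySem.Dict.mk mapping) x 0

theorem pv_foldl_append {α β : Type} (f : β → α) : ∀ (l : List β) (acc : List α),
    l.foldl (fun a mv => a ++ [f mv]) acc = acc ++ l.map f := by
  intro l
  induction l with
  | nil => intro acc; simp
  | cons b l ih => intro acc; simp [ih]

theorem pv_foldl_add (l : List (Int × Int)) (a : Int) :
    l.foldl (fun acc mv => acc + mv.2) a = a + (l.map (fun mv => mv.2)).sum := by
  simpa using PySem.List.foldl_add l (fun mv => mv.2) a

theorem pv_foldl_append2 (l : List (Int × Int)) (acc : List Int) :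
    l.foldl (fun a mv => a ++ [mv.2]) acc = acc ++ l.map (fun mv => mv.2) := by
  simpa using pv_foldl_append (fun mv : Int × Int => mv.2) l acc

theorem pvG_eq (mapping : List (Int × Int)) (x : Int) :
    PySem.Dict.getD (PySem.Dict.mk mapping) x 0 = pvG mapping x := rfl

theorem pv_getElem?_eq_getD {α : Type} (l : List α) (j : Nat) (d : α) (h : j < l.length) :
    l[j]? = some (l.getD j d) := by
  rw [List.getD_eq_getElem?_getD, List.getElem?_eq_getElem h]; rfl

theorem pv_row (mapping : List (Int × Int)) (old_indices : List Int) (newsize start : Int)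
    (row : List Int) (hrow : row.length = old_indices.length) :
    pvFoldU (· + ·) 0 ((old_indices.zip row).map (fun xv => (pvG mapping xv.1, xv.2)))
      (List.replicate newsize.toNat start)
    = (PySem.List.pyRange 0 newsize).map (fun j =>
        start + ((PySem.List.pyGetD
            (pvFoldU (fun a p => a ++ [p]) []
              ((PySem.List.enumerate (old_indices.map (fun x => pvG mapping x))).map
                (fun pm => (pm.2, pm.1)))
              (List.replicate newsize.toNat []))
            j []).map (fun p => PySem.List.pyGetD row p 0)).sum) := by
  have hLlen : (pvFoldU (· + ·) 0 ((old_indices.zip row).map (fun xv => (pvG mapping xv.1, xv.2)))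
      (List.replicate newsize.toNat start)).length = newsize.toNat := by
    rw [pvFoldU_length, List.length_replicate]
  have hRlen : ((PySem.List.pyRange 0 newsize).map (fun j =>
        start + ((PySem.List.pyGetD
            (pvFoldU (fun a p => a ++ [p]) []
              ((PySem.List.enumerate (old_indices.map (fun x => pvG mapping x))).map
                (fun pm => (pm.2, pm.1)))
              (List.replicate newsize.toNat []))
            j []).map (fun p => PySem.List.pyGetD row p 0)).sum)).length = newsize.toNat := by
    rw [List.length_map, PySem.List.length_pyRange_one]
    simp
  apply List.ext_getElem?
  intro j'
  by_cases hj : j' < newsize.toNat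
  · have hns : (0 : Int) ≤ newsize := by omega
    rw [pv_getElem?_eq_getD _ j' 0 (by omega)]
    rw [show newsize = ((newsize.toNat : Nat) : Int) from (Int.toNat_of_nonneg hns).symm] at hRlen ⊢
    simp only [Int.toNat_natCast] at hRlen ⊢
    rw [PySem.List.getElem?_map_pyRange_zero _ newsize.toNat j' hj]
    congr 1
    -- A-side cell
    rw [pvFoldU_getD, List.length_replicate, List.getD_replicate _ hj, pv_foldl_add]
    -- B-side cell
    rw [PySem.List.pyGetD_natCast, pvFoldU_getD, List.length_replicate,
      List.getD_replicate _ hj, pv_foldl_append2, List.nil_append]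
    have hfin := pv_final (pvG mapping)
      (fun c => PySem.List.pyIdx? newsize.toNat c == some j') old_indices row 0 row
      hrow.symm List.drop_zero
    simp only [Nat.cast_zero] at hfin
    simp only [List.filter_map, List.map_map] at hfin ⊢
    rw [hfin]
    simp [Function.comp_def]
  · rw [List.getElem?_eq_none (by omega), List.getElem?_eq_none (by omega)]

-- ===== VERDICT (by name: the statement is the Claim_ definition above) =====
theorem matrix_apply_mapping_to_columns_spec : Claim_equal_matrix_apply_mapping_to_columns := by
  intro old_indices matrix newsize mapping start _ hpre
  obtain ⟨hrect, -, -⟩ := hpre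
  unfold Spec_matrix_apply_mapping_to_columns
  simp only [matrix_apply_mapping_to_columns, matrix_apply_mapping_to_columns_alt, pvG_eq]
  have hinit : pvMakeMatrix (matrix.length : Int) newsize start
      = List.replicate matrix.length (List.replicate newsize.toNat start) := by
    rw [pvMakeMatrix, pv_const_map_replicate, pv_const_map_replicate]
    simp
  rw [hinit]
  have hA := pvA_outer (pvG mapping) old_indices matrix []
    (List.replicate matrix.length (List.replicate newsize.toNat start)) (by simp)
  simp only [List.length_nil, Nat.cast_zero, List.nil_append] at hA
  rw [hA, pv_zip_replicate _ matrix matrix.length _ rfl]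
  have htg : (PySem.List.enumerate (old_indices.map (fun x => pvG mapping x))).foldl
      (fun t pm => PySem.List.pySetD t pm.2 (PySem.List.pyGetD t pm.2 [] ++ [pm.1]))
      ((PySem.List.pyRange 0 newsize).map (fun _ => ([] : List Int)))
      = pvFoldU (fun a p => a ++ [p]) []
          ((PySem.List.enumerate (old_indices.map (fun x => pvG mapping x))).map
            (fun pm => (pm.2, pm.1)))
          (List.replicate newsize.toNat []) := by
    rw [pv_const_map_replicate]
    simp [pvFoldU, List.foldl_map]
  rw [htg]
  apply List.map_congr_left
  intro row hr
  exact pv_row mapping old_indices newsize start row (hrect row hr)
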